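-- pv_equiv track=rewrite | github.com/BaekSeoin/Python_code | 2×2×2 큐브.py | second_check
-- ===== SOURCE A (Python) =====
-- first_check = [(1,9),(9,1),(5,21),(21,5),(13,17),(17,13)]
--
-- def second_check(List):
--     for a in List:
--         for b in List:
--             if a!=b:
--                 if (a,b) in first_check:
--                     ans = (a,b)
--                     return ans
--     ans = (0,0)
--     return ans
-- ===== SOURCE B (Python) =====
-- first_check = [(1,9),(9,1),(5,21),(21,5),(13,17),(17,13)]
-- _partner = dict(first_check)
--
-- def second_check(List):
--     present = set(List)
--     for a in List:
--         p = _partner.get(a)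
--         if p is not None and p in present:
--             return (a, p)
--     return (0, 0)
-- ===== Notes on version B (the rewrite author's own statement) =====
-- stated objective: faster
-- what changed: Replaces the nested scan over all ordered pairs by a partner dictionary built from first_check plus a precomputed membership set, so a single pass over List suffices.
import Mathlib
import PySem

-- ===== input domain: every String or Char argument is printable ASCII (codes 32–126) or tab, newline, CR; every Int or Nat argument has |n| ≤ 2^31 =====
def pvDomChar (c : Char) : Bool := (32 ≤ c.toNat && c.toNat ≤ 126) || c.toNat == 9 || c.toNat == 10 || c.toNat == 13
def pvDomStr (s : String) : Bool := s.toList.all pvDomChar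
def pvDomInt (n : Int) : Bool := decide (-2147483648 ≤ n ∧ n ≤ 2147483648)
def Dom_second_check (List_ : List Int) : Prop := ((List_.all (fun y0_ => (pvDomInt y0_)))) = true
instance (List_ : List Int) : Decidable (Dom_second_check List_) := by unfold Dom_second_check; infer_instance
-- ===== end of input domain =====

-- B replaces A's nested pair scan by a partner dictionary plus a precomputed membership set, one pass over List.

-- ===== PORT A =====
def firstCheck : List (Int × Int) := [(1,9),(9,1),(5,21),(21,5),(13,17),(17,13)]

-- inner 'for b in List' loop of A
def aInner (a : Int) : List Int → Option (Int × Int)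
  | [] => none
  | b :: t => if a ≠ b then (if (a, b) ∈ firstCheck then some (a, b) else aInner a t) else aInner a t

-- outer 'for a in List' loop of A (full : the whole List, scanned by the inner loop)
def aOuter (full : List Int) : List Int → Option (Int × Int)
  | [] => none
  | a :: t =>
    match aInner a full with
    | some r => some r
    | none => aOuter full t

def second_check (List_ : List Int) : List Int :=
  match aOuter List_ List_ with
  | some (a, b) => [a, b]
  | none => [0, 0]

-- ===== PORT B =====
def partnerDict : PySem.Dict Int Int := PySem.Dict.ofList [(1,9),(9,1),(5,21),(21,5),(13,17),(17,13)]

-- the single 'for a in List' loop of B (present = set(List))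
def bLoop (present : PySem.Set Int) : List Int → List Int
  | [] => [0, 0]
  | a :: t =>
    match PySem.Dict.get? partnerDict a with
    | some p => if PySem.Set.contains present p then [a, p] else bLoop present t
    | none => bLoop present t

def second_check_alt (List_ : List Int) : List Int :=
  bLoop (PySem.Set.ofList List_) List_

-- ===== PRECONDITION & SPEC =====
def Spec_second_check (List_ : List Int) (out : List Int) : Prop := out = second_check_alt List_
instance (List_ : List Int) (out : List Int) : Decidable (Spec_second_check List_ out) := by unfold Spec_second_check; infer_instance

-- ===== CLAIM (what is proved, stated in full; the proofs are below) =====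
def Claim_equal_second_check : Prop := ∀ (List_ : List Int), Dom_second_check List_ → Spec_second_check List_ (second_check List_)

-- ===== LEMMAS AND PROOFS =====

-- the partner dictionary lookup, written out as an if-chain
theorem get?_partner (a : Int) :
    PySem.Dict.get? partnerDict a =
      if (1:Int) == a then some 9 else if (9:Int) == a then some 1 else if (5:Int) == a then some 21
      else if (21:Int) == a then some 5 else if (13:Int) == a then some 17 else if (17:Int) == a then some 13 else none := by
  have h : partnerDict = PySem.Dict.mk [(1,9),(9,1),(5,21),(21,5),(13,17),(17,13)] := by decide
  rw [h, PySem.Dict.get?_mk_cons, PySem.Dict.get?_mk_cons, PySem.Dict.get?_mk_cons,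
      PySem.Dict.get?_mk_cons, PySem.Dict.get?_mk_cons, PySem.Dict.get?_mk_cons]
  rfl

-- (a,b) ∈ first_check determines b from a: the pair test equals a partner lookup
theorem mem_firstCheck_iff (a b : Int) :
    (a, b) ∈ firstCheck ↔ PySem.Dict.get? partnerDict a = some b := by
  rw [get?_partner]
  simp only [firstCheck, List.mem_cons, List.not_mem_nil, or_false, Prod.mk.injEq, beq_iff_eq]
  split_ifs <;> simp_all <;> omega

-- every pair of first_check has distinct components
theorem firstCheck_ne (a b : Int) (h : (a, b) ∈ firstCheck) : a ≠ b := by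
  simp [firstCheck, Prod.ext_iff] at h
  rcases h with ⟨h1,h2⟩|⟨h1,h2⟩|⟨h1,h2⟩|⟨h1,h2⟩|⟨h1,h2⟩|⟨h1,h2⟩ <;> omega

-- A's inner loop computes the partner lookup plus a membership test
theorem aInner_eq (a : Int) (bs : List Int) :
    aInner a bs = match PySem.Dict.get? partnerDict a with
      | some p => if p ∈ bs then some (a, p) else none
      | none => none := by
  induction bs with
  | nil => cases PySem.Dict.get? partnerDict a <;> simp [aInner]
  | cons b t ih =>
    by_cases hab : a = b
    · subst hab
      cases h : PySem.Dict.get? partnerDict a with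
      | none => simp [aInner, ih, h]
      | some p =>
        have hpa : p ≠ a := fun he =>
          firstCheck_ne a a (he ▸ (mem_firstCheck_iff a p).mpr h) rfl
        simp [aInner, ih, h, hpa]
    · by_cases hmem : (a, b) ∈ firstCheck
      · simp [aInner, hab, hmem, (mem_firstCheck_iff a b).mp hmem]
      · cases h : PySem.Dict.get? partnerDict a with
        | none => simp [aInner, hab, hmem, ih, h]
        | some p =>
          have hpb : p ≠ b := fun he =>
            hmem (he ▸ (mem_firstCheck_iff a p).mpr h)
          simp [aInner, hab, hmem, ih, h, hpb]

-- the two loops agree step by step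
theorem loops_eq (full : List Int) (xs : List Int) :
    (match aOuter full xs with
      | some (a, b) => [a, b]
      | none => [0, 0]) = bLoop (PySem.Set.ofList full) xs := by
  induction xs with
  | nil => simp [aOuter, bLoop]
  | cons a t ih =>
    rw [aOuter, bLoop, aInner_eq]
    cases h : PySem.Dict.get? partnerDict a with
    | none => simpa using ih
    | some p =>
      by_cases hp : p ∈ full <;> simp [hp, PySem.Set.mem_ofList, ih]

-- ===== VERDICT (by name: the statement is the Claim_ definition above) =====
theorem second_check_spec : Claim_equal_second_check := by
  intro L _
  unfold Spec_second_check second_check second_check_alt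
  exact loops_eq L L
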